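-- pv_equiv track=rewrite | github.com/anhminhbo/IntroToProgramming | asm2/prob4.py | encode_str
-- ===== SOURCE A (Python) =====
-- def encode_str(s):
--     """
--     return the encoded string
--     :param s: input string
--     :return: encoded string
--     """
--     # initialize encoded string and new list to hold value after convert string to ord() and then do the reverse
--     new_list_after_converse_to_ord_and_reverse = []
--
--     # Loop through each character in input string and do the conversion
--     # ord() return int so have to convert back using str() and do [::-1] to reverse the string
--     for char in s:
--         new_list_after_converse_to_ord_and_reverse.append(str(ord(char))[::-1])
--
--     # Even position in original string in reality actually is odd position in computing
--     # and vice versa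
--
--     # Loop through each value in the list
--     # if the index is odd, loop through that value str to modified it
--     # by adding 1 to even position num character
--     for index_lst in range(len(new_list_after_converse_to_ord_and_reverse)):
--         if index_lst % 2 != 0:
--             # Initialize new string to hold new modified value and then we will assigned it back to the list
--             new_num_str = ""
--             # Loop through each character in the string
--             for index_str in range(len(new_list_after_converse_to_ord_and_reverse[index_lst])):
--                 # if the index is even take (int + 1)%10 to convert to [0,9] and convert back to str
--                 # otherwise just concatenate to new string
--                 if index_str % 2 == 0:
--                     new_num_str += str((int(new_list_after_converse_to_ord_and_reverse[index_lst][index_str]) + 1) % 10)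
--                 else:
--                     new_num_str += new_list_after_converse_to_ord_and_reverse[index_lst][index_str]
--             # After finish the loop, modified the value in the list with the new string
--             new_list_after_converse_to_ord_and_reverse[index_lst] = new_num_str
--
--     # Join the complete modified list into string
--     encoded_s = ''.join(new_list_after_converse_to_ord_and_reverse)
--
--     return encoded_s
-- ===== SOURCE B (Python) =====
-- def encode_str(s):
--     """
--     return the encoded string
--     :param s: input string
--     :return: encoded string
--     """
--     # Single pass: emit each character's ord-digits least-significant first,
--     # computed arithmetically with divmod instead of building, reversing and
--     # re-parsing decimal strings; odd-position characters get every even-indexed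
--     # digit incremented mod 10 on the fly.
--     out = []
--     for i, ch in enumerate(s):
--         n = ord(ch)
--         j = 0
--         while True:
--             d = n % 10
--             if i % 2 != 0 and j % 2 == 0:
--                 d = (d + 1) % 10
--             out.append(chr(48 + d))
--             n //= 10
--             j += 1
--             if n == 0:
--                 break
--     return ''.join(out)
-- ===== Notes on version B (the rewrite author's own statement) =====
-- stated objective: alternative
-- what changed: B makes one fused pass over enumerate(s) and emits each character's ord-digits least-significant-first by divmod arithmetic (incrementing alternate digits of odd-position characters on the fly), instead of A's materialized list of reversed ord-strings followed by a second index loop that re-parses and rewrites odd entries.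
import Mathlib
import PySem

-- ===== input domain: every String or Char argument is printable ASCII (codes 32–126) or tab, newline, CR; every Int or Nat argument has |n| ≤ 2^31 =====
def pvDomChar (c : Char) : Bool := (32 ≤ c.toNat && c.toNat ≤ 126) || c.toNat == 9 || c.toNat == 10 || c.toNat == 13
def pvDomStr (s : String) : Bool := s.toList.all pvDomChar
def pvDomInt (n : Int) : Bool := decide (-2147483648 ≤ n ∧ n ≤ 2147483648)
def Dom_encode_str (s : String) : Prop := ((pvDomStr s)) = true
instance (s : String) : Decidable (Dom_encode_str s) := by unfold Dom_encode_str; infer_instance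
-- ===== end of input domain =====

-- B replaces A's two passes (reversed ord-strings, then rewriting odd entries via str/int
-- re-parsing) by one fused pass emitting ord-digits least-significant-first with divmod
-- arithmetic; equal output, alternative decomposition.

-- ===== PORT A =====
-- inner loop of A's second pass: rebuild one fragment, bumping even-indexed digits
def aInner (v : List Char) : List Char :=
  (PySem.List.pyRange 0 v.length 1).foldl
    (fun acc j =>
      if PySem.Int.mod j 2 == 0 then
        acc ++ PySem.Int.toChars
          (PySem.Int.mod ((PySem.Int.ofChars? [PySem.List.pyGetD v j ' ']).getD 0 + 1) 10)
      else
        acc ++ [PySem.List.pyGetD v j ' ']) []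

-- body of A's second loop: rewrite entry i when i is odd
def aStep (l : List (List Char)) (i : Int) : List (List Char) :=
  if PySem.Int.mod i 2 != 0 then
    l.set i.toNat (aInner (PySem.List.pyGetD l i []))
  else l

def encode_str (s : String) : String :=
  -- first loop: str(ord(char))[::-1] appended to a list
  let lst : List (List Char) := s.toList.foldl
    (fun acc ch =>
      acc ++ [(PySem.List.slice? (PySem.Int.toChars (ch.toNat : Int)) none none (-1)).getD []]) []
  -- second loop: for index_lst in range(len(lst)): rewrite odd entries in place
  let lst2 := (PySem.List.pyRange 0 lst.length 1).foldl aStep lst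
  -- ''.join(lst2)
  String.ofList lst2.flatten

-- ===== PORT B =====
-- B's inner while-loop: digits of n least-significant first; if odd, bump even-j digits
def bLoop (n : Nat) (odd : Bool) (j : Nat) : List Char :=
  let d := n % 10
  let d := if odd && j % 2 == 0 then (d + 1) % 10 else d
  let c := Char.ofNat (48 + d)
  if h : n / 10 = 0 then [c] else c :: bLoop (n / 10) odd (j + 1)
decreasing_by
  exact Nat.div_lt_self (Nat.pos_of_ne_zero (fun hn => h (by simp [hn]))) (by norm_num)

def encode_str_alt (s : String) : String :=
  String.ofList ((PySem.List.enumerate s.toList 0).foldl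
    (fun acc p => acc ++ bLoop p.2.toNat (PySem.Int.mod p.1 2 != 0) 0) [])

-- ===== PRECONDITION & SPEC =====
def Spec_encode_str (s : String) (out : String) : Prop := out = encode_str_alt s
instance (s : String) (out : String) : Decidable (Spec_encode_str s out) := by unfold Spec_encode_str; infer_instance

-- ===== CLAIM (what is proved, stated in full; the proofs are below) =====
def Claim_equal_encode_str : Prop := ∀ (s : String), Dom_encode_str s → Spec_encode_str s (encode_str s)

-- ===== LEMMAS AND PROOFS =====

def digitsRev (n : Nat) : List Nat :=
  n % 10 :: (if h : n / 10 = 0 then [] else digitsRev (n / 10))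
decreasing_by
  exact Nat.div_lt_self (Nat.pos_of_ne_zero (fun hn => h (by simp [hn]))) (by norm_num)

def transD (odd : Bool) : Nat → List Nat → List Char
  | _, [] => []
  | j, d :: ds =>
    Nat.digitChar (if odd && j % 2 == 0 then (d + 1) % 10 else d) :: transD odd (j + 1) ds

def outT : Nat → List (List Char) → List (List Char)
  | _, [] => []
  | a, v :: vs => (if a % 2 = 1 then aInner v else v) :: outT (a + 1) vs

theorem digitsRev_lt (n : Nat) : ∀ d ∈ digitsRev n, d < 10 := by
  induction n using Nat.strong_induction_on with
  | _ n ih =>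
    rw [digitsRev]
    intro d hd
    rcases List.mem_cons.mp hd with h1 | h2
    · subst h1; exact Nat.mod_lt _ (by norm_num)
    · by_cases h : n / 10 = 0
      · simp [h] at h2
      · rw [dif_neg h] at h2
        exact ih (n / 10)
          (Nat.div_lt_self (Nat.pos_of_ne_zero (fun hn => h (by simp [hn]))) (by norm_num)) d h2

theorem toDigitsCore_eq (fuel : Nat) : ∀ (n : Nat) (ds : List Char), n < fuel →
    Nat.toDigitsCore 10 fuel n ds = ((digitsRev n).map Nat.digitChar).reverse ++ ds := by
  induction fuel with
  | zero => intro n ds h; omega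
  | succ fuel ih =>
    intro n ds h
    rw [digitsRev]
    by_cases h0 : n / 10 = 0
    · simp [Nat.toDigitsCore, h0]
    · have hn : 0 < n := Nat.pos_of_ne_zero (fun hn => h0 (by simp [hn]))
      have hlt : n / 10 < fuel :=
        Nat.lt_of_lt_of_le (Nat.div_lt_self hn (by norm_num)) (by omega)
      simp only [Nat.toDigitsCore, if_neg h0]
      rw [ih (n / 10) _ hlt, dif_neg h0]
      simp

theorem frag_eq (n : Nat) :
    (PySem.List.slice? (PySem.Int.toChars (n : Int)) none none (-1)).getD []
      = (digitsRev n).map Nat.digitChar := by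
  rw [PySem.List.slice?_none_none_neg_one]
  have h1 : PySem.Int.toChars (n : Int) = Nat.toDigits 10 n := by
    simp [PySem.Int.toChars]
  rw [h1]
  rw [Nat.toDigits, toDigitsCore_eq (n + 1) n [] (by omega)]
  simp

theorem charOf (d : Nat) (hd : d < 10) : Char.ofNat (48 + d) = Nat.digitChar d := by
  interval_cases d <;> decide

theorem bLoop_eq (n : Nat) : ∀ (odd : Bool) (j : Nat),
    bLoop n odd j = transD odd j (digitsRev n) := by
  induction n using Nat.strong_induction_on with
  | _ n ih =>
    intro odd j
    rw [bLoop, digitsRev]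
    by_cases h0 : n / 10 = 0
    · rw [dif_pos h0, dif_pos h0]
      simp only [transD]
      rw [charOf _ (by split <;> omega)]
    · rw [dif_neg h0, dif_neg h0]
      simp only [transD]
      rw [ih (n / 10)
        (Nat.div_lt_self (Nat.pos_of_ne_zero (fun hn => h0 (by simp [hn]))) (by norm_num))]
      rw [charOf _ (by split <;> omega)]

theorem transD_false (j : Nat) (l : List Nat) : transD false j l = l.map Nat.digitChar := by
  induction l generalizing j with
  | nil => rfl
  | cons d ds ih => simp [transD, ih]

theorem digit_inc (d : Nat) (hd : d < 10) :
    PySem.Int.toChars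
        (PySem.Int.mod ((PySem.Int.ofChars? [Nat.digitChar d]).getD 0 + 1) 10)
      = [Nat.digitChar ((d + 1) % 10)] := by
  interval_cases d <;> decide

theorem aInner_loop (k : Nat) : ∀ (l : List Nat), (∀ d ∈ l, d < 10) →
    ∀ (a : Nat) (acc : List Char), l.length - a = k →
    (PySem.List.pyRange (a : Int) ((l.map Nat.digitChar).length : Int) 1).foldl
      (fun acc j =>
        if PySem.Int.mod j 2 == 0 then
          acc ++ PySem.Int.toChars
            (PySem.Int.mod ((PySem.Int.ofChars? [PySem.List.pyGetD (l.map Nat.digitChar) j ' ']).getD 0 + 1) 10)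
        else
          acc ++ [PySem.List.pyGetD (l.map Nat.digitChar) j ' ']) acc
      = acc ++ transD true a (l.drop a) := by
  induction k with
  | zero =>
    intro l hl a acc hk
    have ha : l.length ≤ a := by omega
    rw [List.drop_eq_nil_of_le ha]
    rw [PySem.List.pyRange_one_eq_nil (by simp; omega)]
    simp [transD]
  | succ k ih =>
    intro l hl a acc hk
    have ha : a < l.length := by omega
    rw [PySem.List.pyRange_one_cons (by simp; omega)]
    rw [List.foldl_cons]
    have hget : PySem.List.pyGetD (l.map Nat.digitChar) (a : Int) ' '
        = Nat.digitChar l[a] := by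
      rw [PySem.List.pyGetD_natCast]
      rw [List.getD_eq_getElem _ _ (by simp [ha])]
      simp
    have hdrop : l.drop a = l[a] :: l.drop (a + 1) := List.drop_eq_getElem_cons ha
    have hcast : ((a : Int) + 1) = ((a + 1 : Nat) : Int) := by push_cast; ring
    by_cases hp : a % 2 = 0
    · have hc : (PySem.Int.mod (a : Int) 2 == 0) = true := by
        simp
        exact_mod_cast Nat.dvd_of_mod_eq_zero hp
      rw [if_pos hc, hget, digit_inc l[a] (hl _ (List.getElem_mem ha))]
      rw [hcast, ih l hl (a + 1) _ (by omega)]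
      rw [hdrop]
      simp only [transD, Bool.true_and, List.append_assoc, List.cons_append,
        List.nil_append]
      have : (a % 2 == 0) = true := by simp [hp]
      rw [this]
      simp
    · have hc : (PySem.Int.mod (a : Int) 2 == 0) = false := by
        simp; omega
      rw [if_neg (by rw [hc]; simp), hget]
      rw [hcast, ih l hl (a + 1) _ (by omega)]
      rw [hdrop]
      simp only [transD, Bool.true_and, List.append_assoc, List.cons_append,
        List.nil_append]
      have : (a % 2 == 0) = false := by simp [hp]
      rw [this]
      simp

theorem aInner_eq (l : List Nat) (hl : ∀ d ∈ l, d < 10) :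
    aInner (l.map Nat.digitChar) = transD true 0 l := by
  have h := aInner_loop l.length l hl 0 [] (by omega)
  unfold aInner
  simpa using h

theorem setloop (k : Nat) : ∀ (L : List (List Char)) (a : Nat), L.length - a = k →
    (PySem.List.pyRange (a : Int) (L.length : Int) 1).foldl aStep L
      = L.take a ++ outT a (L.drop a) := by
  induction k with
  | zero =>
    intro L a hk
    have ha : L.length ≤ a := by omega
    rw [PySem.List.pyRange_one_eq_nil (by simp; omega)]
    rw [List.drop_eq_nil_of_le ha, List.take_of_length_le ha]
    simp [outT]
  | succ k ih =>
    intro L a hk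
    have ha : a < L.length := by omega
    rw [PySem.List.pyRange_one_cons (by simp; omega)]
    rw [List.foldl_cons]
    have hcast : ((a : Int) + 1) = ((a + 1 : Nat) : Int) := by push_cast; ring
    have hdrop : L.drop a = L[a] :: L.drop (a + 1) := List.drop_eq_getElem_cons ha
    have hget : PySem.List.pyGetD L (a : Int) [] = L[a] := by
      rw [PySem.List.pyGetD_natCast]
      exact List.getD_eq_getElem _ _ ha
    by_cases hp : a % 2 = 1
    · have hc : (PySem.Int.mod (a : Int) 2 != 0) = true := by
        simp; omega
      have hstep : aStep L (a : Int)
          = L.take a ++ aInner L[a] :: L.drop (a + 1) := by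
        unfold aStep
        rw [if_pos hc, hget]
        have : (a : Int).toNat = a := by omega
        rw [this]
        exact List.set_eq_take_cons_drop _ ha
      rw [hstep]
      set L' := L.take a ++ aInner L[a] :: L.drop (a + 1) with hL'
      have hlen : L'.length = L.length := by
        simp [hL', List.length_take, List.length_drop]; omega
      have hLL : (L.length : Int) = (L'.length : Int) := by rw [hlen]
      rw [hcast, hLL, ih L' (a + 1) (by omega)]
      have htake : L'.take (a + 1) = L.take a ++ [aInner L[a]] := by
        rw [hL', List.take_append]
        have h1 : (L.take a).length = a := by simp; omega
        rw [h1]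
        simp
      have hdrop' : L'.drop (a + 1) = L.drop (a + 1) := by
        rw [hL', List.drop_append]
        have h1 : (L.take a).length = a := by simp; omega
        rw [h1]
        simp
      rw [htake, hdrop', hdrop]
      simp only [outT, if_pos hp]
      simp
    · have hc : (PySem.Int.mod (a : Int) 2 != 0) = false := by
        simp; omega
      have hstep : aStep L (a : Int) = L := by
        unfold aStep; rw [if_neg (by rw [hc]; simp)]
      rw [hstep, hcast, ih L (a + 1) (by omega)]
      rw [hdrop]
      simp only [outT, if_neg hp]
      rw [show L.take (a + 1) = L.take a ++ [L[a]] by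
        rw [List.take_add_one, List.getElem?_eq_getElem ha]; rfl]
      simp only [List.append_assoc, List.cons_append, List.nil_append]

theorem foldl_append_map {α β : Type} (f : α → β) (xs : List α) (acc : List β) :
    xs.foldl (fun acc x => acc ++ [f x]) acc = acc ++ xs.map f := by
  induction xs generalizing acc with
  | nil => simp
  | cons x xs ih => simp [ih]

theorem main_eq (cs : List Char) : ∀ (a : Nat),
    (outT a (cs.map (fun ch => (digitsRev ch.toNat).map Nat.digitChar))).flatten
      = (PySem.List.enumerate cs (a : Int)).foldl
          (fun acc p => acc ++ bLoop p.2.toNat (PySem.Int.mod p.1 2 != 0) 0) [] := by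
  induction cs with
  | nil => intro a; simp [outT, PySem.List.enumerate_nil]
  | cons c cs ih =>
    intro a
    rw [PySem.List.enumerate_cons]
    rw [List.foldl_cons]
    have hacc : ∀ (l : List (Int × Char)) (acc : List Char),
        l.foldl (fun acc p => acc ++ bLoop p.2.toNat (PySem.Int.mod p.1 2 != 0) 0) acc
          = acc ++ l.foldl (fun acc p => acc ++ bLoop p.2.toNat (PySem.Int.mod p.1 2 != 0) 0) [] := by
      intro l
      induction l with
      | nil => simp
      | cons p l ihl =>
        intro acc
        simp only [List.foldl_cons, List.nil_append]
        rw [ihl, ihl (bLoop p.2.toNat (PySem.Int.mod p.1 2 != 0) 0)]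
        simp
    rw [hacc]
    have hcast : ((a : Int) + 1) = ((a + 1 : Nat) : Int) := by push_cast; ring
    rw [hcast, ← ih (a + 1)]
    simp only [List.map_cons, outT, List.flatten_cons, List.nil_append]
    congr 1
    rw [bLoop_eq]
    by_cases hp : a % 2 = 1
    · have hc : (PySem.Int.mod (a : Int) 2 != 0) = true := by
        simp; omega
      rw [if_pos hp, hc, aInner_eq _ (digitsRev_lt c.toNat)]
    · have hc : (PySem.Int.mod (a : Int) 2 != 0) = false := by
        simp; omega
      rw [if_neg hp, hc, transD_false]

-- ===== VERDICT (by name: the statement is the Claim_ definition above) =====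

theorem encode_str_spec : Claim_equal_encode_str := by
  intro s _
  unfold Spec_encode_str encode_str encode_str_alt
  simp only []
  rw [foldl_append_map]
  simp only [List.nil_append]
  have hfrag : s.toList.map
      (fun ch => (PySem.List.slice? (PySem.Int.toChars (ch.toNat : Int)) none none (-1)).getD [])
      = s.toList.map (fun ch => (digitsRev ch.toNat).map Nat.digitChar) := by
    apply List.map_congr_left
    intro ch _
    exact frag_eq ch.toNat
  rw [hfrag]
  have h := setloop (s.toList.map (fun ch => (digitsRev ch.toNat).map Nat.digitChar)).length
    (s.toList.map (fun ch => (digitsRev ch.toNat).map Nat.digitChar)) 0 (by omega)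
  simp only [Nat.cast_zero, List.take_zero, List.drop_zero, List.nil_append] at h
  rw [h]
  have h2 := main_eq s.toList 0
  simp only [Nat.cast_zero] at h2
  rw [h2]
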